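-- pv_equiv track=rewrite | github.com/ZeusAI-123/zeusfeedback_analizer | final_app.py | combine_suggestions
-- ===== SOURCE A (Python) =====
-- from collections import defaultdict
--
-- def combine_suggestions(departments, suggestions):
--     dept_map = defaultdict(list)
--
--     for d, s in zip(departments, suggestions):
--         dept_map[d].append(s)
--
--     final = []
--     for dept, sugs in dept_map.items():
--         combined = f"{dept}: " + "; ".join(sugs)
--         final.append(combined)
--
--     return "\n".join(final)
-- ===== SOURCE B (Python) =====
-- def combine_suggestions(departments, suggestions):
--     pairs = list(zip(departments, suggestions))
--     order = []
--     for d, _ in pairs: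
--         if d not in order:
--             order.append(d)
--     lines = [f"{d}: " + "; ".join(s for dd, s in pairs if dd == d) for d in order]
--     return "\n".join(lines)
-- ===== Notes on version B (the rewrite author's own statement) =====
-- stated objective: alternative
-- what changed: Replaces the defaultdict single-pass grouping with an ordered dedup of departments followed by one filtering scan of the zipped pairs per distinct department.
import Mathlib
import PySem

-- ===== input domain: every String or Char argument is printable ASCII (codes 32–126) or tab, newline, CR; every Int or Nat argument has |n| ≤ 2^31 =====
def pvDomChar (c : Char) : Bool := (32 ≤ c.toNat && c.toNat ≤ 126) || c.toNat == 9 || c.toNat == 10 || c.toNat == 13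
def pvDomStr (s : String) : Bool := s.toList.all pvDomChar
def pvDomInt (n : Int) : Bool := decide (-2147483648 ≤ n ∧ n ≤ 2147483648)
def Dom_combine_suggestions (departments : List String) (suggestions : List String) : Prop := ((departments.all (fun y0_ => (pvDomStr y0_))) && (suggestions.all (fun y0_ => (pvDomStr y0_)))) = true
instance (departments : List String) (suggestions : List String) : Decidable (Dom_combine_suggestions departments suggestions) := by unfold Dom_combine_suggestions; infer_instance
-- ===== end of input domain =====

-- B drops the dict: it dedups departments in first-occurrence order, then filters the
-- zipped pairs once per distinct department (alternative decomposition, not faster).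

-- ===== PORT A =====
def combine_suggestions (departments : List String) (suggestions : List String) : String :=
  let dept_map := (departments.zip suggestions).foldl
    (fun d p => d.modify p.1 [] (fun l => l ++ [p.2])) PySem.Dict.empty
  let final := dept_map.items.foldl
    (fun acc p => acc ++ [p.1 ++ ": " ++ PySem.Str.join "; " p.2]) []
  PySem.Str.join "\n" final

-- ===== PORT B =====
def combine_suggestions_alt (departments : List String) (suggestions : List String) : String :=
  let pairs := departments.zip suggestions
  let order : PySem.Set String := (pairs.map (fun p => p.1)).foldl PySem.Set.add []
  let lines := order.map (fun d =>
    d ++ ": " ++ PySem.Str.join "; " ((pairs.filter (fun p => p.1 == d)).map (fun p => p.2)))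
  PySem.Str.join "\n" lines

-- ===== PRECONDITION & SPEC =====
def Spec_combine_suggestions (departments : List String) (suggestions : List String) (out : String) : Prop := out = combine_suggestions_alt departments suggestions
instance (departments : List String) (suggestions : List String) (out : String) : Decidable (Spec_combine_suggestions departments suggestions out) := by unfold Spec_combine_suggestions; infer_instance

-- ===== CLAIM (what is proved, stated in full; the proofs are below) =====
def Claim_equal_combine_suggestions : Prop := ∀ (departments : List String) (suggestions : List String), Dom_combine_suggestions departments suggestions → Spec_combine_suggestions departments suggestions (combine_suggestions departments suggestions)

-- ===== LEMMAS AND PROOFS =====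

-- ===== VERDICT (by name: the statement is the Claim_ definition above) =====
theorem combine_suggestions_spec : Claim_equal_combine_suggestions := by
  intro departments suggestions _
  unfold Spec_combine_suggestions combine_suggestions combine_suggestions_alt
  dsimp only
  have hnd := PySem.Dict.nodup_keys_foldl_modify_key (departments.zip suggestions)
    (fun p => p.1) [] (fun _ p => fun l => l ++ [p.2]) PySem.Dict.empty (by simp)
  rw [PySem.Dict.items_eq_map_keys _ hnd []]
  simp only [PySem.List.foldl_append_singleton_eq_map, PySem.Dict.keys_foldl_modify_key,
    PySem.Dict.getD_foldl_modify_append, PySem.Dict.getD_empty, PySem.Dict.keys_empty,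
    PySem.Set.update, List.map_map, Function.comp_def, List.nil_append]
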